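-- pv_equiv track=rewrite | github.com/cuiyf17/Master-course | quant start/正定实习/alphamerger2700.py | alphalist_split
-- ===== SOURCE A (Python) =====
-- def alphalist_split(alphaslist):
--     tmp_list = sorted(alphaslist)
--     alpha_groups = dict()
--     for alphaname in tmp_list:
--         code = alphaname.split("_")[4]
--         if(code not in alpha_groups):
--             alpha_groups[code] = []
--         alpha_groups[code].append(alphaname)
--
--     return alpha_groups
-- ===== SOURCE B (Python) =====
-- def alphalist_split(alphaslist):
--     tmp_list = sorted(alphaslist)
--     codes = []
--     for name in tmp_list:
--         c = name.split("_")[4]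
--         if c not in codes:
--             codes.append(c)
--     return {c: [n for n in tmp_list if n.split("_")[4] == c] for c in codes}
-- ===== Notes on version B (the rewrite author's own statement) =====
-- stated objective: alternative
-- what changed: Instead of one accumulating loop that grows dict values in place, B first collects the distinct codes in first-appearance order over the sorted list and then builds the dict with one filter pass per code.
import Mathlib
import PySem

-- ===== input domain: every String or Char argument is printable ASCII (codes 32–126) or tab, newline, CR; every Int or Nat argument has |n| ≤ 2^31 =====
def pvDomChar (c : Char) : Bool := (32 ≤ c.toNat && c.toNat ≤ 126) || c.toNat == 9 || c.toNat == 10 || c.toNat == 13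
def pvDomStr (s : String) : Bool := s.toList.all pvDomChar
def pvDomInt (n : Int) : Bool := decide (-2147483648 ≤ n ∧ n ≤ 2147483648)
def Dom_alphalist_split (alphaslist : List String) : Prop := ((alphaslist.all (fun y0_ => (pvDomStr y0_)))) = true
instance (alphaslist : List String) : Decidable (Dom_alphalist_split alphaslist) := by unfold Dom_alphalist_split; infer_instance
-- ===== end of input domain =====

-- B collects the distinct codes of the sorted list first, then builds each group by filtering;
-- A grows the groups inside one accumulating dict loop. Same values, alternative decomposition.


-- shared helper: alphaname.split("_")[4].  split? is some (sep ≠ ""); pyGet? is none exactly where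
-- Python raises IndexError — those inputs are excluded by Pre_, so the "" default is unreachable there.
def pvCode (s : String) : String :=
  (PySem.List.pyGet? ((PySem.Str.split? s "_").getD []) 4).getD ""

-- ===== PORT A =====
def alphalist_split (alphaslist : List String) : List (String × List String) :=
  let tmp_list := PySem.List.sorted alphaslist (fun x => x)
  let alpha_groups : PySem.Dict String (List String) :=
    tmp_list.foldl
      (fun d alphaname =>
        let code := pvCode alphaname
        let d := if d.contains code then d else d.insert code []
        d.modify code [] (fun v => v ++ [alphaname]))
      PySem.Dict.empty
  alpha_groups.items

-- ===== PORT B =====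
def alphalist_split_alt (alphaslist : List String) : List (String × List String) :=
  let tmp_list := PySem.List.sorted alphaslist (fun x => x)
  let codes : List String :=
    tmp_list.foldl
      (fun cs name =>
        let c := pvCode name
        if cs.contains c then cs else cs ++ [c])
      []
  codes.map (fun c => (c, tmp_list.filter (fun n => pvCode n == c)))

-- ===== PRECONDITION & SPEC =====
-- Pre_ excludes exactly the inputs where Python A raises IndexError: some name has
-- fewer than 5 "_"-separated fields, so alphaname.split("_")[4] does not exist.
def Pre_alphalist_split (alphaslist : List String) : Prop :=
  ∀ s ∈ alphaslist, 5 ≤ ((PySem.Str.split? s "_").getD []).length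
instance (alphaslist : List String) : Decidable (Pre_alphalist_split alphaslist) := by
  unfold Pre_alphalist_split; infer_instance

def pvWitness_alphalist_split : List String :=
  ["x_1_a_b_c", "x_0_a_b_c", "y_2_q_r_c", "x_1_a_b_d"]

def Spec_alphalist_split (alphaslist : List String) (out : List (String × List String)) : Prop := out = alphalist_split_alt alphaslist
instance (alphaslist : List String) (out : List (String × List String)) : Decidable (Spec_alphalist_split alphaslist out) := by unfold Spec_alphalist_split; infer_instance

-- ===== CLAIM (what is proved, stated in full; the proofs are below) =====
def Claim_equal_alphalist_split : Prop := ∀ (alphaslist : List String), Dom_alphalist_split alphaslist → Pre_alphalist_split alphaslist → Spec_alphalist_split alphaslist (alphalist_split alphaslist)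

-- ===== LEMMAS AND PROOFS =====

-- A's loop body is exactly the Dict.modify grouping step (the explicit "insert [] if absent"
-- is what modify with default [] already does when the key is absent).
lemma stepA_eq_modify (d : PySem.Dict String (List String)) (name : String) :
    (let code := pvCode name
     let d' := if d.contains code then d else d.insert code []
     d'.modify code [] (fun v => v ++ [name]))
    = d.modify (pvCode name) [] (fun v => v ++ [name]) := by
  by_cases h : d.contains (pvCode name)
  · simp [h]
  · simp only [h, Bool.false_eq_true, if_false]
    show (d.insert (pvCode name) []).modify (pvCode name) [] (fun v => v ++ [name])
        = d.modify (pvCode name) [] (fun v => v ++ [name])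
    unfold PySem.Dict.modify
    rw [PySem.Dict.getD_insert_self, PySem.Dict.insert_insert_self,
        PySem.Dict.getD_of_not_contains d [] (by simpa using h)]

-- characterisation of A's dict fold: its items are the distinct codes in first-appearance
-- order, each paired with the sublist of names carrying that code.
lemma foldA_char (l : List String) :
    (l.foldl
      (fun d alphaname =>
        let code := pvCode alphaname
        let d := if d.contains code then d else d.insert code []
        d.modify code [] (fun v => v ++ [alphaname]))
      (PySem.Dict.empty : PySem.Dict String (List String))).items
    = (PySem.Set.ofList (l.map pvCode)).map
        (fun c => (c, l.filter (fun n => pvCode n == c))) := by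
  have hstep : (fun (d : PySem.Dict String (List String)) alphaname =>
        let code := pvCode alphaname
        let d := if d.contains code then d else d.insert code []
        d.modify code [] (fun v => v ++ [alphaname]))
      = fun d n => d.modify (pvCode n) [] (fun v => v ++ [n]) := by
    funext d n; exact stepA_eq_modify d n
  rw [hstep]
  set F := l.foldl (fun d n => d.modify (pvCode n) [] (fun v => v ++ [n]))
      (PySem.Dict.empty : PySem.Dict String (List String)) with hF
  have hkeys : F.keys = PySem.Set.ofList (l.map pvCode) := by
    rw [hF, PySem.Dict.keys_foldl_modify_key l pvCode [] (fun _ n => fun v => v ++ [n]),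
        PySem.Dict.keys_empty, PySem.Set.ofList_eq_foldl, PySem.Set.update_eq_foldl]
  have hnodup : F.keys.Nodup := by
    rw [hF]
    exact PySem.Dict.nodup_keys_foldl_modify_key l pvCode [] (fun _ n => fun v => v ++ [n]) _
      PySem.Dict.nodup_keys_empty
  have hgetD : ∀ c, F.getD c [] = l.filter (fun n => pvCode n == c) := by
    intro c
    have hmap : F = (l.map (fun n => (pvCode n, n))).foldl
        (fun d p => d.modify p.1 [] (fun v => v ++ [p.2])) PySem.Dict.empty := by
      rw [hF, List.foldl_map]
    rw [hmap, PySem.Dict.getD_foldl_modify_append, PySem.Dict.getD_empty, List.nil_append,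
        List.filter_map, List.map_map]
    exact List.map_id _
  rw [PySem.Dict.items_eq_map_keys F hnodup [], hkeys]
  exact List.map_congr_left (fun c _ => by rw [hgetD c])

-- ===== VERDICT (by name: the statement is the Claim_ definition above) =====
theorem alphalist_split_spec : Claim_equal_alphalist_split := by
  intro alphaslist _ _
  unfold Spec_alphalist_split alphalist_split alphalist_split_alt
  rw [foldA_char]
  have hcodes : (PySem.List.sorted alphaslist (fun x => x)).foldl
      (fun cs name =>
        let c := pvCode name
        if cs.contains c then cs else cs ++ [c]) []
      = PySem.Set.ofList ((PySem.List.sorted alphaslist (fun x => x)).map pvCode) := by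
    rw [PySem.Set.ofList_eq_foldl, List.foldl_map]
    rfl
  simp only [hcodes]
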